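-- pv_equiv track=rewrite | github.com/joao3p/afir_motor_app | graphs_analysis.py | cos_phi_find_value
-- ===== SOURCE A (Python) =====
-- def cos_phi_find_value(c):
--     i = 0
--     b = 0
--     e = 0
--     for x in range(len(c)):
--         try:
--             float(c[x])
--         except:
--             if i == 1:
--                 e = x
--                 i = 0
--             continue
--         if i == 0:
--             b = x
--             i = 1
--     return [b,e]
-- ===== SOURCE B (Python) =====
-- def cos_phi_find_value(c):
--     def isf(v):
--         try:
--             float(v)
--             return True
--         except:
--             return False
--     f = [isf(v) for v in c]
--     n = len(c)
--     # b = start index of the last maximal float run; e = index just past the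
--     # last float run that is followed by a non-float entry; 0 when absent.
--     starts = [x for x in range(n) if f[x] and (x == 0 or not f[x - 1])]
--     stops = [x for x in range(n) if not f[x] and x > 0 and f[x - 1]]
--     b = starts[-1] if starts else 0
--     e = stops[-1] if stops else 0
--     return [b, e]
-- ===== Notes on version B (the rewrite author's own statement) =====
-- stated objective: simpler
-- what changed: A's one-pass state machine (flag i with mutable b/e) is replaced by a stateless characterisation: b is the last index where a float run starts (non-float or nothing before it), e is the last index whose entry is non-float but whose predecessor is float; both default to 0.
import Mathlib
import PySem

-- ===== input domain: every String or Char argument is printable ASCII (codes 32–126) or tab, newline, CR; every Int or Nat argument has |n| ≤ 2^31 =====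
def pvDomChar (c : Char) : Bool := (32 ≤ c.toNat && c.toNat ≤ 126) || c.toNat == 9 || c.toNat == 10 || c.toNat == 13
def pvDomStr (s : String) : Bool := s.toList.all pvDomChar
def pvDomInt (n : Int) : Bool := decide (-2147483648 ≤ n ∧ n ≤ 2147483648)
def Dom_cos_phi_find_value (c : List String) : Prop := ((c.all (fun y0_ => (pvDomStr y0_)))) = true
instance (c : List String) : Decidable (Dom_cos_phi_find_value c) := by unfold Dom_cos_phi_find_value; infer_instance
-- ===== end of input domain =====

-- B replaces A's forward state machine (flag i, mutable b/e) by a stateless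
-- characterisation: b is the last index where a float run starts, e the last
-- index where a float run has just ended; objective: simpler (same cost).

-- ===== shared tiny helpers: character classes, strip, sign (used by both
-- ports' hand-ports of Python's `float(s)` acceptance test; exact on the
-- ASCII domain: whitespace strip, optional sign, inf/infinity/nan
-- case-insensitive, digit parts with single '_' between digits,
-- optional '.', optional exponent) =====
def pvIsDig (ch : Char) : Bool := '0' ≤ ch && ch ≤ '9'

def pvIsSpace (ch : Char) : Bool :=
  ch = ' ' || ch = '\t' || ch = '\n' || ch = '\r' || ch.toNat == 11 || ch.toNat == 12

def pvStripWs (s : List Char) : List Char :=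
  ((s.dropWhile pvIsSpace).reverse.dropWhile pvIsSpace).reverse

def pvDropSign : List Char → List Char
  | ch :: rest => if ch = '+' || ch = '-' then rest else ch :: rest
  | [] => []

def pvIsInfNan (l : List Char) : Bool :=
  let low := l.map Char.toLower
  low == "inf".toList || low == "infinity".toList || low == "nan".toList

-- ===== PORT A =====
-- A-side float test: a greedy consuming parser (consume a digit part, then
-- optionally '.', a digit part, then an exponent; succeed iff nothing is left)

-- greedy: consume further digits, a '_' only when followed by a digit
def pvDigitsRest : List Char → List Char
  | '_' :: d :: rest => if pvIsDig d then pvDigitsRest rest else '_' :: d :: rest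
  | ch :: rest => if pvIsDig ch then pvDigitsRest rest else ch :: rest
  | [] => []

-- Python digitpart: at least one digit, single '_' between digits; none = no digit
def pvDigitPart? : List Char → Option (List Char)
  | ch :: rest => if pvIsDig ch then some (pvDigitsRest rest) else none
  | [] => none

-- consume the mantissa (digitpart ['.' [digitpart]] | '.' digitpart); none = no mantissa
def pvMant? (l : List Char) : Option (List Char) :=
  match pvDigitPart? l with
  | some r =>
    match r with
    | '.' :: r2 => some (match pvDigitPart? r2 with | some r3 => r3 | none => r2)
    | _ => some r
  | none =>
    match l with
    | '.' :: r2 => pvDigitPart? r2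
    | _ => none

-- after strip/sign/inf-nan: mantissa, then an optional exponent, then nothing
def pvFloatTail (l : List Char) : Bool :=
  match pvMant? l with
  | none => false
  | some [] => true
  | some (ch :: r) =>
    if ch = 'e' ∨ ch = 'E' then pvDigitPart? (pvDropSign r) == some [] else false

def pvFloatOkChars (s : List Char) : Bool :=
  let l := pvDropSign (pvStripWs s)
  if pvIsInfNan l then true else pvFloatTail l

-- True iff `float(v)` succeeds (the `try: float(..)` of A; exact on ASCII)
def pvFloatOk (s : String) : Bool := pvFloatOkChars s.toList

-- loop body of A: state (i, b, e); try-float success/except branches in order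
def pvStepA (c : List String) (st : Int × Int × Int) (x : Nat) : Int × Int × Int :=
  match st with
  | (i, b, e) =>
    if pvFloatOk (c.getD x "") then        -- index x < len c always (range), getD exact
      if i == 0 then (1, (x : Int), e) else (i, b, e)
    else
      if i == 1 then (0, b, (x : Int)) else (i, b, e)

def cos_phi_find_value (c : List String) : List Int :=
  let s := (List.range c.length).foldl (pvStepA c) (0, 0, 0)
  [s.2.1, s.2.2]

-- ===== PORT B =====
-- B-side float test: no consuming parser; split the string by `span` at the
-- exponent marker and at the decimal point, and check each complete segment
-- with a whole-list digit-run recogniser (exact on ASCII, same spec as A's).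
mutual
-- a complete digit run: digit (('_')? digit)*
def pvDigAllB : List Char → Bool
  | [] => false
  | ch :: r => pvIsDig ch && pvDigContB r
-- continuation of a digit run ('_' must be followed by a fresh digit run)
def pvDigContB : List Char → Bool
  | [] => true
  | ch :: r => if ch = '_' then pvDigAllB r else pvIsDig ch && pvDigContB r
end

-- mantissa: split at the first '.'; "d", "d.", "d.d", ".d" are the valid shapes
def pvMantB (l : List Char) : Bool :=
  match l.span (fun ch => !(ch == '.')) with
  | (a, []) => pvDigAllB a
  | (a, _ :: b) =>
    if a.isEmpty then pvDigAllB b else pvDigAllB a && (b.isEmpty || pvDigAllB b)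

-- split at the first exponent marker; mantissa before, signed digit run after
def pvFloatTailB (l : List Char) : Bool :=
  match l.span (fun ch => !(ch == 'e' || ch == 'E')) with
  | (m, []) => pvMantB m
  | (m, _ :: ex) => pvMantB m && pvDigAllB (pvDropSign ex)

def pvFloatOkB (s : String) : Bool :=
  let l := pvDropSign (pvStripWs s.toList)
  if pvIsInfNan l then true else pvFloatTailB l

-- x is a run start: c[x] floats and it is position 0 or c[x-1] does not
def pvIsStart (f : List Bool) (x : Nat) : Bool :=
  f.getD x false && (x == 0 || !(f.getD (x - 1) false))

-- x is just past a terminated run: c[x] does not float but c[x-1] does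
def pvIsStop (f : List Bool) (x : Nat) : Bool :=
  !(f.getD x false) && decide (0 < x) && f.getD (x - 1) false

def cos_phi_find_value_alt (c : List String) : List Int :=
  let f := c.map pvFloatOkB
  let n := c.length
  let starts := (List.range n).filter (pvIsStart f)
  let stops := (List.range n).filter (pvIsStop f)
  let b : Int := match starts.getLast? with | some x => (x : Int) | none => 0
  let e : Int := match stops.getLast? with | some x => (x : Int) | none => 0
  [b, e]

-- ===== PRECONDITION & SPEC =====
def Spec_cos_phi_find_value (c : List String) (out : List Int) : Prop := out = cos_phi_find_value_alt c
instance (c : List String) (out : List Int) : Decidable (Spec_cos_phi_find_value c out) := by unfold Spec_cos_phi_find_value; infer_instance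

-- ===== CLAIM (what is proved, stated in full; the proofs are below) =====
def Claim_equal_cos_phi_find_value : Prop := ∀ (c : List String), Dom_cos_phi_find_value c → Spec_cos_phi_find_value c (cos_phi_find_value c)

-- ===== LEMMAS AND PROOFS =====

-- ---- part 1: the two float tests agree ----

-- a list after which greedy digit consumption stops immediately
def pvBStop : List Char → Bool
  | [] => true
  | ch :: _ => ch == '.' || ch == 'e' || ch == 'E'

lemma pvDigitsRest_cons_ne (ch : Char) (hne : ch ≠ '_') (q : List Char) :
    pvDigitsRest (ch :: q) = if pvIsDig ch then pvDigitsRest q else ch :: q := by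
  cases q <;> simp [pvDigitsRest, hne]

lemma pvDigitsRest_cons2 (d : Char) (rest : List Char) :
    pvDigitsRest ('_' :: d :: rest) =
      if pvIsDig d then pvDigitsRest rest else '_' :: d :: rest := by
  simp [pvDigitsRest]

lemma pvDigitsRest_bstop (r : List Char) (hr : pvBStop r = true) :
    pvDigitsRest r = r := by
  rcases r with _ | ⟨ch, t⟩
  · rfl
  · have h1 := hr
    simp [pvBStop] at h1
    have hne : ch ≠ '_' := by rcases h1 with (h | h) | h <;> subst h <;> decide
    have hnd : pvIsDig ch = false := by
      rcases h1 with (h | h) | h <;> subst h <;> decide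
    rw [pvDigitsRest_cons_ne ch hne, hnd]
    simp

lemma pvDigitsRest_append (p r : List Char) (hp : pvDigContB p = true)
    (hr : pvBStop r = true) : pvDigitsRest (p ++ r) = r := by
  revert hp
  induction p using pvDigContB.induct
    (motive_1 := fun p => pvDigAllB p = true → pvDigitsRest ('_' :: (p ++ r)) = r) with
  | case1 h => simp [pvDigAllB] at h
  | case2 ch p' ih h =>
    simp [pvDigAllB] at h
    rw [List.cons_append, pvDigitsRest_cons2, h.1]
    exact ih h.2
  | case3 => intro _; exact pvDigitsRest_bstop r hr
  | case4 p' ih =>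
    intro h
    have h1 : pvDigAllB p' = true := by simpa [pvDigContB] using h
    exact ih h1
  | case5 ch p' hne ih =>
    intro h
    simp [pvDigContB, hne] at h
    rw [List.cons_append, pvDigitsRest_cons_ne ch hne, h.1]
    exact ih h.2

lemma pvDigitPart_append (p r : List Char) (hp : pvDigAllB p = true)
    (hr : pvBStop r = true) : pvDigitPart? (p ++ r) = some r := by
  rcases p with _ | ⟨ch, p'⟩
  · simp [pvDigAllB] at hp
  · simp [pvDigAllB] at hp
    rw [List.cons_append]
    simp [pvDigitPart?, hp.1, pvDigitsRest_append p' r hp.2 hr]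

lemma pvDigitsRest_stuck (p r : List Char) (hp : pvDigContB p = false)
    (hr : pvBStop r = true) :
    ∃ m', pvDigitsRest (p ++ r) = m' ++ r ∧ m' ≠ [] ∧ ∀ x ∈ m', x ∈ p := by
  revert hp
  induction p using pvDigContB.induct
    (motive_1 := fun p => pvDigAllB p = false →
      ∃ m', pvDigitsRest ('_' :: (p ++ r)) = m' ++ r ∧ m' ≠ [] ∧ ∀ x ∈ m', x ∈ '_' :: p) with
  | case1 h =>
    refine ⟨['_'], ?_, by simp, by simp⟩
    rcases r with _ | ⟨y, t⟩
    · rfl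
    · have h1 := hr
      simp [pvBStop] at h1
      have hnd : pvIsDig y = false := by rcases h1 with (h | h) | h <;> subst h <;> decide
      rw [List.nil_append, pvDigitsRest_cons2, hnd]
      simp
  | case2 ch p' ih h =>
    simp [pvDigAllB] at h
    rw [List.cons_append, pvDigitsRest_cons2]
    cases hd : pvIsDig ch with
    | false =>
      exact ⟨'_' :: ch :: p', by simp, by simp, by intro x hx; simpa using hx⟩
    | true =>
      obtain ⟨m', hm1, hm2, hm3⟩ := ih (h hd)
      exact ⟨m', by simpa using hm1, hm2, fun x hx => by simp [hm3 x hx]⟩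
  | case3 => intro h; simp [pvDigContB] at h
  | case4 p' ih =>
    intro h
    have h1 : pvDigAllB p' = false := by simpa [pvDigContB] using h
    obtain ⟨m', hm1, hm2, hm3⟩ := ih h1
    exact ⟨m', by simpa using hm1, hm2, fun x hx => by simpa using hm3 x hx⟩
  | case5 ch p' hne ih =>
    intro h
    simp [pvDigContB, hne] at h
    rw [List.cons_append, pvDigitsRest_cons_ne ch hne]
    cases hd : pvIsDig ch with
    | false =>
      exact ⟨ch :: p', by simp, by simp, by intro x hx; simpa using hx⟩
    | true =>
      obtain ⟨m', hm1, hm2, hm3⟩ := ih (h hd)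
      exact ⟨m', by simpa using hm1, hm2, fun x hx => by simp [hm3 x hx]⟩

lemma pvDigitPart_stuck (p r : List Char) (hp : pvDigAllB p = false)
    (hr : pvBStop r = true) :
    pvDigitPart? (p ++ r) = none ∨
      ∃ m', pvDigitPart? (p ++ r) = some (m' ++ r) ∧ m' ≠ [] ∧ ∀ x ∈ m', x ∈ p := by
  rcases p with _ | ⟨ch, p'⟩
  · left
    rcases r with _ | ⟨y, t⟩
    · rfl
    · have h1 := hr
      simp [pvBStop] at h1
      have hnd : pvIsDig y = false := by rcases h1 with (h | h) | h <;> subst h <;> decide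
      simp [pvDigitPart?, hnd]
  · rw [List.cons_append]
    cases hd : pvIsDig ch with
    | false => left; simp [pvDigitPart?, hd]
    | true =>
      have hc : pvDigContB p' = false := by
        cases hcc : pvDigContB p' with
        | false => rfl
        | true => simp [pvDigAllB, hd, hcc] at hp
      obtain ⟨m', hm1, hm2, hm3⟩ := pvDigitsRest_stuck p' r hc hr
      right
      exact ⟨m', by simp [pvDigitPart?, hd, hm1], hm2, fun x hx => by simp [hm3 x hx]⟩

lemma pvDigitsRest_empty_iff (l : List Char) :
    (pvDigitsRest l == []) = pvDigContB l := by
  induction l using pvDigContB.induct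
    (motive_1 := fun l => (pvDigitsRest ('_' :: l) == []) = pvDigAllB l) with
  | case1 => decide
  | case2 ch p' ih =>
    rw [pvDigitsRest_cons2]
    cases hd : pvIsDig ch with
    | false => simp [pvDigAllB, hd]
    | true => simp [pvDigAllB, hd, ih]
  | case3 => decide
  | case4 p' ih => simpa [pvDigContB] using ih
  | case5 ch p' hne ih =>
    rw [pvDigitsRest_cons_ne ch hne]
    cases hd : pvIsDig ch with
    | false => simp [pvDigContB, hne, hd]
    | true => simp [pvDigContB, hne, hd, ih]

lemma pvDigitPart_empty_iff (l : List Char) :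
    (pvDigitPart? l == some []) = pvDigAllB l := by
  rcases l with _ | ⟨ch, p'⟩
  · decide
  · cases hd : pvIsDig ch with
    | false => simp [pvDigitPart?, pvDigAllB, hd]
    | true => simp [pvDigitPart?, pvDigAllB, hd, ← pvDigitsRest_empty_iff]

def pvEStop : List Char → Bool
  | [] => true
  | ch :: _ => ch == 'e' || ch == 'E'

lemma pvBStop_of_eStop (r : List Char) (hr : pvEStop r = true) : pvBStop r = true := by
  rcases r with _ | ⟨y, t⟩
  · rfl
  · simp [pvEStop] at hr
    rcases hr with h | h <;> subst h <;> rfl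

lemma pvDigitPart_bstop (r : List Char) (hr : pvBStop r = true) : pvDigitPart? r = none := by
  rcases r with _ | ⟨y, t⟩
  · rfl
  · simp [pvBStop] at hr
    have hnd : pvIsDig y = false := by rcases hr with (h | h) | h <;> subst h <;> decide
    simp [pvDigitPart?, hnd]

lemma pvDropWhile_head_false {p : Char → Bool} {l : List Char} {c : Char} {t : List Char}
    (h : l.dropWhile p = c :: t) : p c = false := by
  induction l with
  | nil => simp [List.dropWhile] at h
  | cons x xs ih =>
    by_cases hx : p x = true
    · rw [List.dropWhile_cons_of_pos hx] at h
      exact ih h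
    · rw [List.dropWhile_cons_of_neg hx] at h
      injection h with h1 _
      subst h1
      simpa using hx

-- pvMant? shape helpers
lemma pvMant?_dot (t : List Char) : pvMant? ('.' :: t) = pvDigitPart? t := by
  unfold pvMant?
  have h0 : pvDigitPart? ('.' :: t) = none := by
    have : pvIsDig '.' = false := by decide
    simp [pvDigitPart?, this]
  rw [h0]
  split <;> simp_all

lemma pvMant?_some_dot {l r2 : List Char} (h : pvDigitPart? l = some ('.' :: r2)) :
    pvMant? l = some ((pvDigitPart? r2).getD r2) := by
  unfold pvMant?
  rw [h]
  rcases h3 : pvDigitPart? r2 with _ | r3 <;> simp [h3]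

lemma pvMant?_some_ne {l : List Char} {c : Char} {t : List Char}
    (h : pvDigitPart? l = some (c :: t)) (hc : c ≠ '.') : pvMant? l = some (c :: t) := by
  unfold pvMant?
  rw [h]
  split
  · next r3 heq =>
    injection heq with heq2
    subst heq2
    split <;> simp_all
  · simp_all

lemma pvMant?_some_nil {l : List Char} (h : pvDigitPart? l = some []) :
    pvMant? l = some [] := by
  unfold pvMant?
  rw [h]

lemma pvMant?_none {l : List Char} (h : pvDigitPart? l = none)
    (h2 : ∀ t, l ≠ '.' :: t) : pvMant? l = none := by
  unfold pvMant?
  rw [h]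
  split <;> simp_all

-- pvFloatTail shape helpers
lemma pvFloatTail_none {l : List Char} (h : pvMant? l = none) : pvFloatTail l = false := by
  unfold pvFloatTail
  rw [h]

lemma pvFloatTail_nil {l : List Char} (h : pvMant? l = some []) : pvFloatTail l = true := by
  unfold pvFloatTail
  rw [h]

lemma pvFloatTail_stuck {l : List Char} {c : Char} {t : List Char}
    (h : pvMant? l = some (c :: t)) (h1 : (c == 'e' || c == 'E') = false) :
    pvFloatTail l = false := by
  unfold pvFloatTail
  rw [h]
  have h2 : ¬(c = 'e' ∨ c = 'E') := by simp at h1; tauto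
  split <;> simp_all

lemma pvFloatTail_exp {l : List Char} {c : Char} {t : List Char}
    (h : pvMant? l = some (c :: t)) (h1 : (c == 'e' || c == 'E') = true) :
    pvFloatTail l = (pvDigitPart? (pvDropSign t) == some []) := by
  unfold pvFloatTail
  rw [h]
  have h2 : c = 'e' ∨ c = 'E' := by simpa using h1
  split <;> simp_all

lemma pvMant_of_mantB (m r : List Char) (hm : pvMantB m = true)
    (hr : pvEStop r = true) : pvMant? (m ++ r) = some r := by
  have hbr : pvBStop r = true := pvBStop_of_eStop r hr
  have hsplit : m.takeWhile (fun ch => !(ch == '.')) ++ m.dropWhile (fun ch => !(ch == '.')) = m :=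
    List.takeWhile_append_dropWhile
  unfold pvMantB at hm
  rw [List.span_eq_takeWhile_dropWhile] at hm
  rcases hdd : m.dropWhile (fun ch => !(ch == '.')) with _ | ⟨dh, b⟩
  · -- no '.' in m : m is a single digit run
    rw [hdd, List.append_nil] at hsplit
    rw [hdd] at hm
    simp only at hm
    rw [hsplit] at hm
    have h2 := pvDigitPart_append _ r hm hbr
    rcases r with _ | ⟨y, t⟩
    · exact pvMant?_some_nil h2
    · simp [pvEStop] at hr
      have hy : y ≠ '.' := by rcases hr with h | h <;> subst h <;> decide
      exact pvMant?_some_ne h2 hy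
  · have hdh : dh = '.' := by
      have := pvDropWhile_head_false (p := fun ch => !(ch == '.')) hdd
      simpa using this
    subst hdh
    rw [hdd] at hm hsplit
    simp only at hm
    rw [← hsplit]
    rcases haa : m.takeWhile (fun ch => !(ch == '.')) with _ | ⟨ah, a'⟩
    · -- a empty: '.' :: b, digit run b
      rw [haa] at hm
      simp at hm
      rw [List.nil_append, List.cons_append, pvMant?_dot]
      exact pvDigitPart_append b r hm hbr
    · -- a nonempty
      rw [haa] at hm
      simp only [List.isEmpty_cons, Bool.false_eq_true, if_false] at hm
      have hma : pvDigAllB (ah :: a') = true := by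
        cases h : pvDigAllB (ah :: a') <;> simp [h] at hm ⊢
      have hmb : (b.isEmpty || pvDigAllB b) = true := by
        cases h : (b.isEmpty || pvDigAllB b) <;> simp [h, hma] at hm ⊢
      have hass : ((ah :: a') ++ '.' :: b) ++ r = (ah :: a') ++ ('.' :: (b ++ r)) := by
        simp
      rw [hass]
      have h2 : pvDigitPart? ((ah :: a') ++ ('.' :: (b ++ r))) = some ('.' :: (b ++ r)) :=
        pvDigitPart_append _ _ hma (by rfl)
      rw [pvMant?_some_dot h2]
      rcases hbb : b with _ | ⟨bh, b'⟩
      · -- "digits." : no fraction digits, fallback keeps r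
        simp only [List.nil_append]
        rw [pvDigitPart_bstop r hbr]
        simp
      · -- "digits.digits"
        rw [hbb] at hmb
        simp [List.isEmpty_cons] at hmb
        rw [← hbb] at hmb ⊢
        rw [pvDigitPart_append b r hmb hbr]
        simp

lemma pvFloatTail_of_not_mantB (m r : List Char) (hm : pvMantB m = false)
    (hnd : ∀ x ∈ m, (x == 'e' || x == 'E') = false)
    (hr : pvEStop r = true) : pvFloatTail (m ++ r) = false := by
  have hbr : pvBStop r = true := pvBStop_of_eStop r hr
  have hsplit : m.takeWhile (fun ch => !(ch == '.')) ++ m.dropWhile (fun ch => !(ch == '.')) = m :=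
    List.takeWhile_append_dropWhile
  have hsubA : ∀ x ∈ m.takeWhile (fun ch => !(ch == '.')), x ∈ m :=
    fun x hx => (List.takeWhile_sublist _).subset hx
  have hdotA : ∀ x ∈ m.takeWhile (fun ch => !(ch == '.')), x ≠ '.' := by
    intro x hx
    have := List.mem_takeWhile_imp hx
    simpa using this
  unfold pvMantB at hm
  rw [List.span_eq_takeWhile_dropWhile] at hm
  rcases hdd : m.dropWhile (fun ch => !(ch == '.')) with _ | ⟨dh, b⟩
  · -- no '.' in m, digit-run check failed
    rw [hdd, List.append_nil] at hsplit
    rw [hdd] at hm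
    simp only at hm
    rw [hsplit] at hsubA hdotA hm
    rcases pvDigitPart_stuck _ r hm hbr with hn | ⟨m', hm1, hm2, hm3⟩
    · apply pvFloatTail_none
      apply pvMant?_none hn
      intro t ht
      rcases hcc : m with _ | ⟨ah, a'⟩
      · rw [hcc, List.nil_append] at ht
        subst ht
        simp [pvEStop] at hr
      · rw [hcc, List.cons_append] at ht
        exact hdotA ah (by rw [hcc]; exact List.mem_cons_self ..) (by injection ht)
    · rcases m' with _ | ⟨mh, mt⟩
      · exact absurd rfl hm2
      · rw [List.cons_append] at hm1
        have hmem : mh ∈ m := hsubA mh (hm3 mh (List.mem_cons_self ..))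
        exact pvFloatTail_stuck (pvMant?_some_ne hm1 (hdotA mh (hm3 mh (List.mem_cons_self ..))))
          (hnd mh hmem)
  · have hdh : dh = '.' := by
      have := pvDropWhile_head_false (p := fun ch => !(ch == '.')) hdd
      simpa using this
    subst hdh
    have hsubB : ∀ x ∈ b, x ∈ m := by
      intro x hx
      have h1 : x ∈ m.dropWhile (fun ch => !(ch == '.')) := by rw [hdd]; exact List.mem_cons_of_mem _ hx
      exact (List.dropWhile_sublist _).subset h1
    rw [hdd] at hm hsplit
    simp only at hm
    rw [← hsplit]
    rcases haa : m.takeWhile (fun ch => !(ch == '.')) with _ | ⟨ah, a'⟩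
    · -- ". b" with b not a digit run
      rw [haa] at hm
      simp at hm
      rw [List.nil_append, List.cons_append]
      rcases pvDigitPart_stuck b r hm hbr with hn | ⟨m', hm1, hm2, hm3⟩
      · exact pvFloatTail_none (by rw [pvMant?_dot]; exact hn)
      · rcases m' with _ | ⟨mh, mt⟩
        · exact absurd rfl hm2
        · rw [List.cons_append] at hm1
          exact pvFloatTail_stuck (by rw [pvMant?_dot]; exact hm1)
            (hnd mh (hsubB mh (hm3 mh (List.mem_cons_self ..))))
    · -- "a . b" with the check failing
      rw [haa] at hm hsubA hdotA
      simp only [List.isEmpty_cons, Bool.false_eq_true, if_false] at hm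
      by_cases hda : pvDigAllB (ah :: a') = true
      · -- fraction part is bad: b nonempty and not a digit run
        rw [hda] at hm
        simp only [Bool.true_and] at hm
        have hbne : b.isEmpty = false := by
          cases h : b.isEmpty
          · rfl
          · simp [h] at hm
        have hball : pvDigAllB b = false := by
          cases h : pvDigAllB b
          · rfl
          · simp [h, hbne] at hm
        have hass : ((ah :: a') ++ '.' :: b) ++ r = (ah :: a') ++ ('.' :: (b ++ r)) := by
          simp
        rw [hass]
        have h2 : pvDigitPart? ((ah :: a') ++ ('.' :: (b ++ r))) = some ('.' :: (b ++ r)) :=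
          pvDigitPart_append _ _ hda (by rfl)
        have hmq := pvMant?_some_dot h2
        rcases pvDigitPart_stuck b r hball hbr with hn | ⟨m', hm1, hm2, hm3⟩
        · rw [hn] at hmq
          simp only [Option.getD_none] at hmq
          rcases hbb : b with _ | ⟨bh, b'⟩
          · rw [hbb] at hbne
            simp at hbne
          · rw [hbb, List.cons_append] at hmq
            exact pvFloatTail_stuck hmq
              (hnd bh (hsubB bh (by rw [hbb]; exact List.mem_cons_self ..)))
        · rw [hm1] at hmq
          simp only [Option.getD_some] at hmq
          rcases m' with _ | ⟨mh, mt⟩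
          · exact absurd rfl hm2
          · rw [List.cons_append] at hmq
            exact pvFloatTail_stuck hmq
              (hnd mh (hsubB mh (hm3 mh (List.mem_cons_self ..))))
      · -- integer part is bad
        have hda' : pvDigAllB (ah :: a') = false := by
          cases h : pvDigAllB (ah :: a')
          · rfl
          · exact absurd h hda
        have hass : ((ah :: a') ++ '.' :: b) ++ r = (ah :: a') ++ ('.' :: (b ++ r)) := by
          simp
        rw [hass]
        rcases pvDigitPart_stuck (ah :: a') ('.' :: (b ++ r)) hda' (by rfl) with hn | ⟨m', hm1, hm2, hm3⟩
        · apply pvFloatTail_none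
          apply pvMant?_none hn
          intro t ht
          exact hdotA ah (List.mem_cons_self ..) (by injection ht)
        · rcases m' with _ | ⟨mh, mt⟩
          · exact absurd rfl hm2
          · rw [List.cons_append] at hm1
            have hmemA : mh ∈ ah :: a' := hm3 mh (List.mem_cons_self ..)
            exact pvFloatTail_stuck (pvMant?_some_ne hm1 (hdotA mh hmemA))
              (hnd mh (hsubA mh hmemA))

lemma pvFloatTailB_eq (l : List Char) : pvFloatTailB l = pvFloatTail l := by
  have hsplit : l.takeWhile (fun ch => !(ch == 'e' || ch == 'E')) ++
      l.dropWhile (fun ch => !(ch == 'e' || ch == 'E')) = l :=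
    List.takeWhile_append_dropWhile
  have hnd : ∀ x ∈ l.takeWhile (fun ch => !(ch == 'e' || ch == 'E')),
      (x == 'e' || x == 'E') = false := by
    intro x hx
    have := List.mem_takeWhile_imp hx
    simpa using this
  unfold pvFloatTailB
  rw [List.span_eq_takeWhile_dropWhile]
  rcases hdd : l.dropWhile (fun ch => !(ch == 'e' || ch == 'E')) with _ | ⟨ch, ex⟩
  · -- no exponent marker anywhere
    rw [hdd, List.append_nil] at hsplit
    simp only
    rw [hsplit] at hnd ⊢
    cases hmB : pvMantB l with
    | true =>
      have h2 := pvMant_of_mantB l [] hmB (by rfl)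
      rw [List.append_nil] at h2
      rw [pvFloatTail_nil h2]
    | false =>
      have h2 := pvFloatTail_of_not_mantB l [] hmB hnd (by rfl)
      rw [List.append_nil] at h2
      rw [h2]
  · -- l = m ++ ch :: ex with ch the first exponent marker
    have hch : (ch == 'e' || ch == 'E') = true := by
      have h := pvDropWhile_head_false (p := fun ch => !(ch == 'e' || ch == 'E')) hdd
      cases hcc : (ch == 'e' || ch == 'E')
      · simp only at h
        rw [hcc] at h
        simp at h
      · rfl
    have hes : pvEStop (ch :: ex) = true := hch
    simp only
    conv_rhs => rw [← hsplit, hdd]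
    cases hmB : pvMantB (l.takeWhile (fun ch => !(ch == 'e' || ch == 'E'))) with
    | true =>
      have h2 := pvMant_of_mantB _ (ch :: ex) hmB hes
      rw [pvFloatTail_exp h2 hch, pvDigitPart_empty_iff]
      simp
    | false =>
      have h2 := pvFloatTail_of_not_mantB _ (ch :: ex) hmB hnd hes
      rw [h2]
      simp

lemma pvFloatOkB_eq (s : String) : pvFloatOkB s = pvFloatOk s := by
  simp only [pvFloatOkB, pvFloatOk, pvFloatOkChars, pvFloatTailB_eq]

-- ---- part 2: A's state machine computes B's stateless characterisation ----

def pvG (c : List String) (x : Nat) : Bool := pvFloatOk (c.getD x "")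

def pvLastD (l : List Nat) : Int := match l.getLast? with | some x => (x : Int) | none => 0

lemma pvLastD_concat (l : List Nat) (a : Nat) : pvLastD (l ++ [a]) = (a : Int) := by
  simp [pvLastD]

lemma pvG_unfold (c : List String) (x : Nat) : pvFloatOk (List.getD c x "") = pvG c x := rfl

lemma pv_getD_map (c : List String) (x : Nat) :
    (c.map pvFloatOkB).getD x false = pvG c x := by
  rcases Nat.lt_or_ge x c.length with h | h
  · unfold pvG List.getD
    rw [List.getElem?_eq_getElem (by simpa using h), List.getElem?_eq_getElem h]
    simp [pvFloatOkB_eq]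
  · have h1 : c.getD x "" = "" := List.getD_eq_default _ _ h
    have h2 : (c.map pvFloatOkB).getD x false = false :=
      List.getD_eq_default _ _ (by simpa using h)
    rw [h2, pvG, h1]
    decide

lemma pv_inv (c : List String) (k : Nat) :
    (List.range k).foldl (pvStepA c) (0, 0, 0) =
      ((if 0 < k ∧ pvG c (k - 1) = true then (1 : Int) else 0),
       pvLastD ((List.range k).filter (fun x => pvG c x && (x == 0 || !pvG c (x - 1)))),
       pvLastD ((List.range k).filter (fun x => !pvG c x && decide (0 < x) && pvG c (x - 1)))) := by
  induction k with
  | zero => simp [pvLastD]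
  | succ k ih =>
    rw [List.range_succ, List.foldl_append, List.filter_append, List.filter_append, ih]
    simp only [List.foldl_cons, List.foldl_nil, List.filter_cons, List.filter_nil]
    simp only [pvStepA, pvG_unfold]
    by_cases hk : pvG c k = true
    · by_cases hi : 0 < k ∧ pvG c (k - 1) = true
      · -- inside a run: state and both index sets unchanged
        simp [hk, hi, Nat.pos_iff_ne_zero.mp hi.1]
      · -- a run starts at k
        rcases Nat.eq_zero_or_pos k with h0 | h0
        · subst h0
          simp [hk, pvLastD]
        · have h1 : pvG c (k - 1) = false := by
            cases h : pvG c (k - 1)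
            · rfl
            · exact absurd ⟨h0, h⟩ hi
          simp [hk, h1, pvLastD_concat]
    · have hk' : pvG c k = false := by
        cases h : pvG c k
        · rfl
        · exact absurd h hk
      by_cases hi : 0 < k ∧ pvG c (k - 1) = true
      · -- a run ended just before k
        simp [hk', hi.1, hi.2, pvLastD_concat]
      · -- outside any run: nothing changes
        rcases Nat.eq_zero_or_pos k with h0 | h0
        · subst h0
          simp [hk', pvLastD]
        · have h1 : pvG c (k - 1) = false := by
            cases h : pvG c (k - 1)
            · rfl
            · exact absurd ⟨h0, h⟩ hi
          simp [hk', h1]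

lemma pv_alt_eq (c : List String) :
    cos_phi_find_value_alt c =
      [pvLastD ((List.range c.length).filter (fun x => pvG c x && (x == 0 || !pvG c (x - 1)))),
       pvLastD ((List.range c.length).filter (fun x => !pvG c x && decide (0 < x) && pvG c (x - 1)))] := by
  unfold cos_phi_find_value_alt
  dsimp only
  have hs : (List.range c.length).filter (pvIsStart (c.map pvFloatOkB)) =
      (List.range c.length).filter (fun x => pvG c x && (x == 0 || !pvG c (x - 1))) := by
    apply List.filter_congr
    intro x _
    unfold pvIsStart
    rw [pv_getD_map c x, pv_getD_map c (x - 1)]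
  have ht : (List.range c.length).filter (pvIsStop (c.map pvFloatOkB)) =
      (List.range c.length).filter (fun x => !pvG c x && decide (0 < x) && pvG c (x - 1)) := by
    apply List.filter_congr
    intro x _
    unfold pvIsStop
    rw [pv_getD_map c x, pv_getD_map c (x - 1)]
  rw [hs, ht]
  rfl

-- ===== VERDICT (by name: the statement is the Claim_ definition above) =====
theorem cos_phi_find_value_spec : Claim_equal_cos_phi_find_value := by
  intro c _
  unfold Spec_cos_phi_find_value cos_phi_find_value
  rw [pv_inv, pv_alt_eq]
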